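-- pv_equiv track=rewrite | github.com/priyankapatki/mimsmind | mimsmind1_priyanka.py | cows
-- ===== SOURCE A (Python) =====
-- def count_dict(num_str):
--     """This function will store the number of times each digit
--      appears in the number """
--     # unique_num : is a list of distinct digits that appear in the num_str
--     unique_num = list(set(list(num_str)))
--     cnt_dict = {}
--
--     for c_key in unique_num:
--         cnt_dict[c_key] = num_str.count(c_key)
--
--     return cnt_dict
--
-- def cows(rand_str, user_str):
--     # Checks if each digit in user input is present in random number or not
--     # If present, the function will not count a number twice.
--     # note: It also includes bull values, which will be removed later.
--     rand_dict = count_dict(rand_str)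
--     user_dict = count_dict(user_str)
--     cow = 0
--
--     for u_key in user_dict:
--         if u_key in rand_dict:
--             temp_cow = min(user_dict[u_key], rand_dict[u_key]) #to prevent from counting digits that repeat twice.
--             cow += temp_cow
--
--     return cow
-- ===== SOURCE B (Python) =====
-- def cows(rand_str, user_str):
--     avail = {}
--     for c in rand_str:
--         avail[c] = avail.get(c, 0) + 1
--     cow = 0
--     for c in user_str:
--         if avail.get(c, 0) > 0:
--             avail[c] = avail[c] - 1
--             cow += 1
--     return cow
-- ===== Notes on version B (the rewrite author's own statement) =====
-- stated objective: simpler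
-- what changed: Replaced the two count-dict builds (distinct-char .count scans) and the min-accumulation loop over dict keys by a single greedy pass: one counter of rand_str, then one pass over user_str consuming an available count per matched character.
import Mathlib
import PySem

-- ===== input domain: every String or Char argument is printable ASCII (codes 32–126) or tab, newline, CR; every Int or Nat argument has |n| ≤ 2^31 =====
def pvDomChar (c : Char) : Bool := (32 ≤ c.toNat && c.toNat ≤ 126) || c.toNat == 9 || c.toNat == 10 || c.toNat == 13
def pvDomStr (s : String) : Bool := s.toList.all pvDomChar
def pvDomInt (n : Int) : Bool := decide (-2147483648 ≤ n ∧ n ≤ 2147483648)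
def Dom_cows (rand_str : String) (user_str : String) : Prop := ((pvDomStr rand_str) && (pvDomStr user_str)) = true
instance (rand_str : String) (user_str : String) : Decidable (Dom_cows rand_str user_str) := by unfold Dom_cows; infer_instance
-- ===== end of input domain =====

-- B replaces A's per-distinct-character .count scans and min-accumulation over dict keys
-- by a single greedy pass consuming a counter of rand_str (simpler: one loop, no helper).

-- ===== PORT A =====
-- count_dict(num_str): dict from each distinct char to num_str.count(c).
-- num_str.count(c_key) for the single character c_key is exact as List.count on the char list.
def countDictA (num : List Char) : PySem.Dict Char Int :=
  (PySem.Set.ofList num).foldl (fun d c => d.insert c ((num.count c : Int))) PySem.Dict.empty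

def cows (rand_str : String) (user_str : String) : Int :=
  let rand_dict := countDictA rand_str.toList
  let user_dict := countDictA user_str.toList
  user_dict.keys.foldl
    (fun cow u_key =>
      if rand_dict.contains u_key then
        cow + min (user_dict.getD u_key 0) (rand_dict.getD u_key 0)
      else cow) 0

-- ===== PORT B =====
def cows_alt (rand_str : String) (user_str : String) : Int :=
  let avail := rand_str.toList.foldl (fun d c => d.insert c (d.getD c 0 + 1)) PySem.Dict.empty
  (user_str.toList.foldl
    (fun (s : PySem.Dict Char Int × Int) c =>
      if s.1.getD c 0 > 0 then (s.1.insert c (s.1.getD c 0 - 1), s.2 + 1) else s)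
    (avail, 0)).2

-- ===== PRECONDITION & SPEC =====
def Spec_cows (rand_str : String) (user_str : String) (out : Int) : Prop := out = cows_alt rand_str user_str
instance (rand_str : String) (user_str : String) (out : Int) : Decidable (Spec_cows rand_str user_str out) := by unfold Spec_cows; infer_instance

-- ===== CLAIM (what is proved, stated in full; the proofs are below) =====
def Claim_equal_cows : Prop := ∀ (rand_str : String) (user_str : String), Dom_cows rand_str user_str → Spec_cows rand_str user_str (cows rand_str user_str)

-- ===== LEMMAS AND PROOFS =====

-- A's count_dict is exactly Counter(num): same items list.
theorem countDictA_eq_counter (num : List Char) :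
    countDictA num = PySem.Dict.counter num := by
  apply PySem.Dict.ext
  have h := PySem.Dict.items_foldl_insert_fresh (PySem.Set.ofList num) (fun c => c)
      (fun c => ((num.count c : Int))) PySem.Dict.empty
      (by intro a _; exact PySem.Dict.contains_empty a)
      (by simp [PySem.Set.nodup_ofList num])
  unfold countDictA
  rw [PySem.Dict.items_counter]
  simpa using h

-- pure greedy matching against a budget function
def greedy (g : Char → Int) : List Char → Int
  | [] => 0
  | c :: l => if g c > 0 then 1 + greedy (Function.update g c (g c - 1)) l else greedy g l

-- B's fold is `cow + greedy` on the budgets stored in the dict.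
theorem foldB_eq_greedy (l : List Char) (d : PySem.Dict Char Int) (cow : Int) :
    (l.foldl
      (fun (s : PySem.Dict Char Int × Int) c =>
        if s.1.getD c 0 > 0 then (s.1.insert c (s.1.getD c 0 - 1), s.2 + 1) else s)
      (d, cow)).2 = cow + greedy (fun c => d.getD c 0) l := by
  induction l generalizing d cow with
  | nil => simp [greedy]
  | cons c l ih =>
    simp only [List.foldl_cons, greedy]
    by_cases h : d.getD c 0 > 0
    · rw [if_pos h, if_pos h, ih]
      have : (fun x => (d.insert c (d.getD c 0 - 1)).getD x 0)
           = Function.update (fun x => d.getD x 0) c (d.getD c 0 - 1) := by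
        funext x
        rw [PySem.Dict.getD_insert]
        by_cases hx : x = c
        · simp [hx, Function.update]
        · simp [hx, Function.update]
      rw [this]; ring
    · rw [if_neg h, if_neg h, ih]

-- greedy against a nonnegative budget g counts, for each distinct char, min(count, budget).
theorem greedy_eq_sum (l : List Char) (g : Char → Int) (hg : ∀ c, 0 ≤ g c) :
    greedy g l = ∑ c ∈ l.toFinset, min ((l.count c : Int)) (g c) := by
  induction l generalizing g with
  | nil => simp [greedy]
  | cons c l ih =>
    rw [greedy]
    by_cases h : g c > 0
    · rw [if_pos h]
      have hg' : ∀ x, 0 ≤ Function.update g c (g c - 1) x := by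
        intro x
        by_cases hx : x = c
        · simp [hx, Function.update]; omega
        · simp [hx, Function.update, hg x]
      rw [ih _ hg']
      have hterm : ∀ x ∈ l.toFinset.erase c,
          min ((l.count x : Int)) (Function.update g c (g c - 1) x)
            = min (((c :: l).count x : Int)) (g x) := by
        intro x hx
        have hxc : x ≠ c := Finset.ne_of_mem_erase hx
        simp [Function.update, hxc, List.count_cons, Ne.symm hxc]
      by_cases hc : c ∈ l.toFinset
      · rw [List.toFinset_cons, Finset.insert_eq_self.mpr hc]
        rw [← Finset.add_sum_erase _ _ hc, ← Finset.add_sum_erase _ _ hc]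
        rw [Finset.sum_congr rfl hterm]
        have h1 : min (((c :: l).count c : Int)) (g c)
            = 1 + min ((l.count c : Int)) (Function.update g c (g c - 1) c) := by
          simp only [List.count_cons_self, Function.update_self]
          push_cast; omega
        rw [h1]; ring
      · rw [List.toFinset_cons, Finset.sum_insert hc]
        have hcnt : l.count c = 0 := by
          simpa [List.count_eq_zero] using (fun hmem => hc (List.mem_toFinset.mpr hmem))
        have herase : l.toFinset.erase c = l.toFinset := Finset.erase_eq_of_notMem hc
        rw [← herase, Finset.sum_congr rfl hterm, herase]
        have h1 : min (((c :: l).count c : Int)) (g c) = 1 := by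
          simp only [List.count_cons_self, hcnt]
          omega
        have hsum : ∀ x ∈ l.toFinset,
            min (((c :: l).count x : Int)) (g x) = min ((l.count x : Int)) (g x) := by
          intro x hx
          have hxc : x ≠ c := fun he => hc (he ▸ hx)
          simp [Ne.symm hxc]
        rw [Finset.sum_congr rfl hsum, h1]
    · rw [if_neg h]
      have hgc : g c = 0 := le_antisymm (not_lt.mp h) (hg c)
      rw [ih _ hg]
      have hterm : ∀ x ∈ (c :: l).toFinset,
          min (((c :: l).count x : Int)) (g x) = min ((l.count x : Int)) (g x) := by
        intro x _
        by_cases hxc : x = c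
        · subst hxc
          have : (0:Int) ≤ (l.count x : Int) := Int.natCast_nonneg _
          simp [hgc, List.count_cons_self]
          omega
        · simp [Ne.symm hxc]
      rw [Finset.sum_congr rfl hterm]
      by_cases hc : c ∈ l.toFinset
      · rw [List.toFinset_cons, Finset.insert_eq_self.mpr hc]
      · rw [List.toFinset_cons, Finset.sum_insert hc]
        have hcnt : l.count c = 0 := by
          simpa [List.count_eq_zero] using (fun hmem => hc (List.mem_toFinset.mpr hmem))
        simp [hcnt, hgc]

-- A's fold over the distinct chars of user equals the same Finset sum.
theorem foldA_eq_sum (u r : List Char) :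
    (PySem.Set.ofList u).foldl
      (fun cow k =>
        if (PySem.Dict.counter r).contains k then
          cow + min ((PySem.Dict.counter u).getD k 0) ((PySem.Dict.counter r).getD k 0)
          else cow) 0
    = ∑ c ∈ u.toFinset, min ((u.count c : Int)) ((r.count c : Int)) := by
  have hcongr : ∀ (cow : Int) (k : Char), k ∈ PySem.Set.ofList u →
      (if (PySem.Dict.counter r).contains k then
        cow + min ((PySem.Dict.counter u).getD k 0) ((PySem.Dict.counter r).getD k 0)
        else cow)
      = cow + min ((u.count k : Int)) ((r.count k : Int)) := by
    intro cow k _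
    rw [PySem.Dict.getD_counter, PySem.Dict.getD_counter, PySem.Dict.contains_counter]
    by_cases h : k ∈ r
    · simp [h]
    · have hcnt : r.count k = 0 := List.count_eq_zero.mpr h
      have hmin : min ((u.count k : Int)) ((r.count k : Int)) = 0 := by
        rw [hcnt]; exact min_eq_right (Int.natCast_nonneg _)
      simp [h, hmin]
  rw [PySem.List.foldl_congr_mem _ _ (fun cow k => cow + min ((u.count k : Int)) ((r.count k : Int))) _ hcongr]
  rw [PySem.List.foldl_add, zero_add]
  rw [← List.sum_toFinset _ (PySem.Set.nodup_ofList u)]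
  apply Finset.sum_congr
  · ext x; simp [PySem.Set.mem_ofList]
  · intro x _; rfl

-- ===== VERDICT (by name: the statement is the Claim_ definition above) =====
theorem cows_spec : Claim_equal_cows := by
  intro rand_str user_str _
  unfold Spec_cows
  simp only [cows, cows_alt]
  rw [countDictA_eq_counter, countDictA_eq_counter, PySem.Dict.keys_counter]
  rw [foldA_eq_sum]
  rw [PySem.Dict.foldl_insert_getD_add_one_eq_counter]
  rw [foldB_eq_greedy, zero_add]
  have hg : (fun c => (PySem.Dict.counter rand_str.toList).getD c 0)
      = fun c => ((rand_str.toList.count c : Int)) :=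
    funext fun c => PySem.Dict.getD_counter _ _
  rw [hg, greedy_eq_sum _ _ (fun c => Int.natCast_nonneg _)]
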